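-- pv_equiv track=rewrite | github.com/Denisov21/Songpressplusplus | src/songpressPlusPlus/SongpressFrame.py | _apply_chord_map
-- ===== SOURCE A (Python) =====
-- def _apply_chord_map(lines, chord_map):
--     """
--     Re-insert chords from chord_map into lines (already stripped of chords).
--     Positions are visible-character indices (ignoring '_').
--     """
--     result = []
--     for i, line in enumerate(lines):
--         if i >= len(chord_map) or not chord_map[i]:
--             result.append(line)
--             continue
--         out      = []
--         raw_src  = 0
--         for vis_pos, chord in chord_map[i]:
--             # find the raw index corresponding to vis_pos visible chars
--             count = 0
--             insert_at = len(line)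
--             for idx, c in enumerate(line):
--                 if c != '_':
--                     if count == vis_pos:
--                         insert_at = idx
--                         break
--                     count += 1
--             out.append(line[raw_src:insert_at])
--             out.append('[' + chord + ']')
--             raw_src = insert_at
--         out.append(line[raw_src:])
--         result.append(''.join(out))
--     return result
-- ===== SOURCE B (Python) =====
-- def _apply_chord_map(lines, chord_map):
--     # B: precompute visible-index -> raw-index table once per line, then look each chord position up
--     out = []
--     it = iter(chord_map)
--     for line in lines:
--         chords = next(it, ())
--         if not chords:
--             out.append(line)
--             continue
--         vis2raw = [i for i, c in enumerate(line) if c != '_']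
--         n = len(line)
--         parts = []
--         raw = 0
--         for vp, chord in chords:
--             ins = vis2raw[vp] if 0 <= vp < len(vis2raw) else n
--             parts.append(line[raw:ins])
--             parts.append('[' + chord + ']')
--             raw = ins
--         parts.append(line[raw:])
--         out.append(''.join(parts))
--     return out
-- ===== Notes on version B (the rewrite author's own statement) =====
-- stated objective: alternative
-- what changed: B precomputes a visible-index->raw-index table once per line (one comprehension pass) and finds each chord's insertion point by table lookup, instead of A's fresh linear scan of the line for every chord; lines are paired with their chord lists by iteration instead of indexing.
import Mathlib
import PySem

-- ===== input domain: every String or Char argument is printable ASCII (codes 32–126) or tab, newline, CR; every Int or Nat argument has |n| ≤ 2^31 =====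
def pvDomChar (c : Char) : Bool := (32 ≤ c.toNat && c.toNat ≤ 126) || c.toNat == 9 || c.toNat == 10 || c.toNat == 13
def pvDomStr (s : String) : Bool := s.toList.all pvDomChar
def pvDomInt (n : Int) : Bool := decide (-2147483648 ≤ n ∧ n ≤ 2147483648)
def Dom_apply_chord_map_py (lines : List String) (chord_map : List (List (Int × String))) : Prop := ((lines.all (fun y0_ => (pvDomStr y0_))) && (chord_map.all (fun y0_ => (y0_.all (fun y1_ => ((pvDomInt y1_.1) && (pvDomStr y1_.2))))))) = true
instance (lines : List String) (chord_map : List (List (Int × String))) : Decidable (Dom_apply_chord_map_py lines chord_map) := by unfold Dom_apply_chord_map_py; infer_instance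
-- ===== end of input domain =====

-- B replaces A's per-chord rescan of the line with a once-per-line visible-index→raw-index table and table lookups; return values proved equal on all inputs.


-- ===== PORT A =====
-- A's inner scan: first raw index whose running count of non-'_' chars equals vis_pos, else len(line)
def aFind (cs : List Char) (idx : Nat) (count : Int) (vp : Int) (n : Nat) : Nat :=
  match cs with
  | [] => n
  | c :: rest =>
    if c ≠ '_' then
      if count = vp then idx else aFind rest (idx + 1) (count + 1) vp n
    else aFind rest (idx + 1) count vp n

-- A's chord loop: out-list accumulated as its join, raw_src carried along
def aChordLoop (line : List Char) (n : Nat) (chords : List (Int × String)) (acc : List Char) (raw_src : Nat) : List Char :=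
  match chords with
  | [] => acc ++ line.drop raw_src
  | (vp, chord) :: rest =>
    let insert_at := aFind line 0 0 vp n
    aChordLoop line n rest
      (acc ++ ((line.drop raw_src).take (insert_at - raw_src) ++ ('[' :: chord.toList ++ [']'])))
      insert_at

-- A's outer loop over enumerate(lines), indexing chord_map by i
def aLines (lines : List String) (chord_map : List (List (Int × String))) (i : Nat) : List String :=
  match lines with
  | [] => []
  | line :: rest =>
    (if chord_map.length ≤ i ∨ chord_map.getD i [] = [] then line
     else String.ofList (aChordLoop line.toList line.toList.length (chord_map.getD i []) [] 0))
      :: aLines rest chord_map (i + 1)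

def apply_chord_map_py (lines : List String) (chord_map : List (List (Int × String))) : List String :=
  aLines lines chord_map 0

-- ===== PORT B =====
-- B's comprehension [i for i, c in enumerate(line) if c != '_']: visible-index → raw-index table
def bVis (cs : List Char) (i : Nat) : List Nat :=
  match cs with
  | [] => []
  | c :: rest => if c ≠ '_' then i :: bVis rest (i + 1) else bVis rest (i + 1)

-- B's O(1) lookup: vis2raw[vp] if 0 <= vp < len(vis2raw) else n
def bInsertAt (v2r : List Nat) (n : Nat) (vp : Int) : Nat :=
  if 0 ≤ vp ∧ vp < (v2r.length : Int) then v2r.getD vp.toNat 0 else n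

-- B's chord loop: builds the parts list, joined at the end
def bChordLoop (line : List Char) (v2r : List Nat) (n : Nat) (chords : List (Int × String)) (parts : List (List Char)) (raw : Nat) : List Char :=
  match chords with
  | [] => (parts ++ [line.drop raw]).flatten
  | (vp, chord) :: rest =>
    let ins := bInsertAt v2r n vp
    bChordLoop line v2r n rest
      (parts ++ [(line.drop raw).take (ins - raw), '[' :: chord.toList ++ [']']]) ins

-- B pairs each line with its chord list by iterating both lists together (missing chord lists = no chords)
def bLines (lines : List String) (cm : List (List (Int × String))) : List String :=
  match lines, cm with
  | [], _ => []
  | line :: rest, [] => line :: bLines rest []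
  | line :: rest, chords :: cmrest =>
    (if chords = [] then line
     else
       let cs := line.toList
       String.ofList (bChordLoop cs (bVis cs 0) cs.length chords [] 0))
      :: bLines rest cmrest

def apply_chord_map_py_alt (lines : List String) (chord_map : List (List (Int × String))) : List String :=
  bLines lines chord_map

-- ===== PRECONDITION & SPEC =====
def Spec_apply_chord_map_py (lines : List String) (chord_map : List (List (Int × String))) (out : List String) : Prop := out = apply_chord_map_py_alt lines chord_map
instance (lines : List String) (chord_map : List (List (Int × String))) (out : List String) : Decidable (Spec_apply_chord_map_py lines chord_map out) := by unfold Spec_apply_chord_map_py; infer_instance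

-- ===== CLAIM (what is proved, stated in full; the proofs are below) =====
def Claim_equal_apply_chord_map_py : Prop := ∀ (lines : List String) (chord_map : List (List (Int × String))), Dom_apply_chord_map_py lines chord_map → Spec_apply_chord_map_py lines chord_map (apply_chord_map_py lines chord_map)

-- ===== LEMMAS AND PROOFS =====

theorem find_eq_lookup : ∀ (cs : List Char) (idx : Nat) (count vp : Int) (n : Nat),
    aFind cs idx count vp n =
      if 0 ≤ vp - count ∧ vp - count < ((bVis cs idx).length : Int)
      then (bVis cs idx).getD (vp - count).toNat 0 else n := by
  intro cs
  induction cs with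
  | nil =>
    intro idx count vp n
    simp only [aFind, bVis, List.length_nil]
    rw [if_neg (by omega)]
  | cons c rest ih =>
    intro idx count vp n
    by_cases hc : c = '_'
    · simp only [aFind, bVis, hc, ne_eq, not_true_eq_false, if_false]
      exact ih (idx + 1) count vp n
    · simp only [aFind, bVis, ne_eq, hc, not_false_eq_true, if_true]
      by_cases he : count = vp
      · subst he
        rw [if_pos rfl, if_pos ⟨by omega, by push_cast [List.length_cons]; omega⟩]
        simp
      · rw [if_neg he, ih (idx + 1) (count + 1) vp n]
        simp only [List.length_cons]
        push_cast
        split_ifs with h1 h2 h2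
        · have hk : (vp - count).toNat = (vp - (count + 1)).toNat + 1 := by omega
          rw [hk, List.getD_cons_succ]
        · exfalso; omega
        · exfalso; omega
        · rfl


theorem chord_eq : ∀ (chords : List (Int × String)) (line : List Char) (parts : List (List Char)) (raw : Nat),
    aChordLoop line line.length chords parts.flatten raw =
      bChordLoop line (bVis line 0) line.length chords parts raw := by
  intro chords
  induction chords with
  | nil => intro line parts raw; simp [aChordLoop, bChordLoop]
  | cons p rest ih =>
    intro line parts raw
    obtain ⟨vp, chord⟩ := p
    simp only [aChordLoop, bChordLoop]
    have hf : aFind line 0 0 vp line.length = bInsertAt (bVis line 0) line.length vp := by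
      rw [find_eq_lookup]; simp [bInsertAt]
    rw [hf]
    have h2 := ih line
      (parts ++ [(line.drop raw).take (bInsertAt (bVis line 0) line.length vp - raw),
        '[' :: chord.toList ++ [']']])
      (bInsertAt (bVis line 0) line.length vp)
    simpa using h2

theorem lines_eq : ∀ (lines : List String) (cm : List (List (Int × String))) (i : Nat),
    aLines lines cm i = bLines lines (cm.drop i) := by
  intro lines
  induction lines with
  | nil => intro cm i; simp [aLines, bLines]
  | cons line rest ih =>
    intro cm i
    rcases h : cm.drop i with _ | ⟨chords, t⟩
    · have hlen : cm.length ≤ i := List.drop_eq_nil_iff.mp h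
      have h1 : cm.drop (i + 1) = [] := List.drop_eq_nil_iff.mpr (by omega)
      simp only [aLines, bLines, if_pos (Or.inl hlen)]
      rw [ih cm (i + 1), h1]
    · have hlt : i < cm.length := by
        by_contra hge
        rw [List.drop_eq_nil_iff.mpr (by omega)] at h
        simp at h
      have hget : cm.getD i [] = chords := by
        have h0 : cm[i]? = some chords := by
          have := @List.getElem?_drop _ cm i 0
          rw [h] at this; simpa using this.symm
        simp [List.getD_eq_getElem?_getD, h0]
      have ht : cm.drop (i + 1) = t := by
        have := @List.tail_drop _ cm i
        rw [h] at this; simpa using this.symm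
      simp only [aLines, bLines, hget, ht, ih cm (i + 1)]
      have hfalse : ¬ cm.length ≤ i := by omega
      by_cases hz : chords = []
      · rw [if_pos (Or.inr hz), if_pos hz]
      · rw [if_neg (by push Not; exact ⟨by omega, hz⟩), if_neg hz]
        have := chord_eq chords line.toList [] 0
        simp only [List.flatten_nil] at this
        rw [this]

-- ===== VERDICT (by name: the statement is the Claim_ definition above) =====
theorem apply_chord_map_py_spec : Claim_equal_apply_chord_map_py := by
  intro lines cm _
  unfold Spec_apply_chord_map_py apply_chord_map_py apply_chord_map_py_alt
  simpa using lines_eq lines cm 0
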